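-- pv_equiv track=rewrite | github.com/jaumpedro214/urna-logs-data-eng | streamlit/app/data.py | calculate_zone_group
-- ===== SOURCE A (Python) =====
-- def calculate_zone_group(zone):
--     if zone == 'ALL':
--         return zone
--
--     zone = int(zone)
--     ZONE_GROUPS = [ (x, x+20) for x in range(0, 800, 20) ]
--     for group in ZONE_GROUPS:
--         if zone >= group[0] and zone < group[1]:
--             return f"{group[0]}-{group[1]}"
-- ===== SOURCE B (Python) =====
-- def calculate_zone_group(zone):
--     if zone == 'ALL':
--         return zone
--     zone = int(zone)
--     if 0 <= zone < 800:
--         lo = zone // 20 * 20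
--         return f"{lo}-{lo + 20}"
-- ===== Notes on version B (the rewrite author's own statement) =====
-- stated objective: simpler
-- what changed: Replaces building a 40-element bucket list and scanning it with a direct closed-form bucket computation zone//20*20 guarded by 0 <= zone < 800.
import Mathlib
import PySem

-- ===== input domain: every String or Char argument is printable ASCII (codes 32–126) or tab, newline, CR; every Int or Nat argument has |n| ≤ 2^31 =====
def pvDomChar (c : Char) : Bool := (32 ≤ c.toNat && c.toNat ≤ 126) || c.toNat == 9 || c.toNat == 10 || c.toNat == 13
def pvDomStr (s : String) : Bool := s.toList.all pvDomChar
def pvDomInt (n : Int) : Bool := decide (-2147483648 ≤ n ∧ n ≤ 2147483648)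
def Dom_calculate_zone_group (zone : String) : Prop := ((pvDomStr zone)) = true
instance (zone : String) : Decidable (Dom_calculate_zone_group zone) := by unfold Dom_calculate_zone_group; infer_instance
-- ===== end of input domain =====

-- B replaces A's build-40-buckets-and-scan with a direct closed-form bucket computation (simpler).

-- ===== PORT A =====
-- the for-loop over ZONE_GROUPS with early return
def calcLoopA (z : Int) : List (Int × Int) → Option String
  | [] => none
  | g :: rest =>
    if z ≥ g.1 ∧ z < g.2 then some (PySem.Int.toStr g.1 ++ "-" ++ PySem.Int.toStr g.2)
    else calcLoopA z rest

def calculate_zone_group (zone : String) : Option String :=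
  if zone = "ALL" then some zone
  else
    match PySem.Int.ofStr? zone with
    | none => none  -- int(zone) raises ValueError; excluded by Pre_
    | some z => calcLoopA z ((PySem.List.pyRange 0 800 20).map (fun x => (x, x + 20)))

-- ===== PORT B =====
def calculate_zone_group_alt (zone : String) : Option String :=
  if zone = "ALL" then some zone
  else
    match PySem.Int.ofStr? zone with
    | none => none  -- int(zone) raises ValueError; excluded by Pre_
    | some z =>
      if 0 ≤ z ∧ z < 800 then
        some (PySem.Int.toStr (PySem.Int.floordiv z 20 * 20) ++ "-" ++
              PySem.Int.toStr (PySem.Int.floordiv z 20 * 20 + 20))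
      else none

-- ===== PRECONDITION & SPEC =====
-- Pre_ excludes exactly the inputs where int(zone) raises ValueError (zone neither 'ALL' nor an int literal).
def Pre_calculate_zone_group (zone : String) : Prop :=
  zone = "ALL" ∨ (PySem.Int.ofStr? zone).isSome = true
instance (zone : String) : Decidable (Pre_calculate_zone_group zone) := by unfold Pre_calculate_zone_group; infer_instance
def pvWitness_calculate_zone_group : String := "42"

def Spec_calculate_zone_group (zone : String) (out : Option String) : Prop := out = calculate_zone_group_alt zone
instance (zone : String) (out : Option String) : Decidable (Spec_calculate_zone_group zone out) := by unfold Spec_calculate_zone_group; infer_instance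

-- ===== CLAIM (what is proved, stated in full; the proofs are below) =====
def Claim_equal_calculate_zone_group : Prop := ∀ (zone : String), Dom_calculate_zone_group zone → Pre_calculate_zone_group zone → Spec_calculate_zone_group zone (calculate_zone_group zone)

-- ===== LEMMAS AND PROOFS =====
theorem label_eq (z c d : Int) (h1 : c ≤ z) (h2 : z < d) (h3 : 20 ∣ c) (h4 : d = c + 20) :
    PySem.Int.toStr c ++ "-" ++ PySem.Int.toStr d =
    PySem.Int.toStr (z / 20 * 20) ++ "-" ++ PySem.Int.toStr (z / 20 * 20 + 20) := by
  subst h4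
  have h : z / 20 * 20 = c := by omega
  rw [h]

theorem pyRange20_nil (a : Int) (h : ¬ a < 800) : PySem.List.pyRange a 800 20 = [] := by
  rw [PySem.List.pyRange_of_pos _ _ (by norm_num : (0:Int) < 20), if_neg h]
  simp

theorem pyRange20_cons (a : Int) (hab : a < 800) :
    PySem.List.pyRange a 800 20 = a :: PySem.List.pyRange (a + 20) 800 20 := by
  rw [PySem.List.pyRange_of_pos _ _ (by norm_num : (0:Int) < 20),
      PySem.List.pyRange_of_pos _ _ (by norm_num : (0:Int) < 20), if_pos hab]
  by_cases h2 : a + 20 < 800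
  · rw [if_pos h2]
    have hn : ((800 - a + 20 - 1) / 20).toNat = ((800 - (a + 20) + 20 - 1) / 20).toNat + 1 := by
      omega
    rw [hn, List.range_succ_eq_map, List.map_cons, List.map_map]
    refine congrArg₂ _ (by norm_num) (List.map_congr_left fun k _ => ?_)
    simp only [Function.comp_apply]
    push_cast
    ring
  · rw [if_neg h2]
    have hn : ((800 - a + 20 - 1) / 20).toNat = 1 := by omega
    rw [hn]
    simp

theorem scan_lemma (m : Nat) : ∀ (z a : Int), a + 20 * m = 800 → a ≤ z →
    calcLoopA z ((PySem.List.pyRange a 800 20).map (fun x => (x, x + 20))) =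
      (if z < 800 then
        some (PySem.Int.toStr (z / 20 * 20) ++ "-" ++ PySem.Int.toStr (z / 20 * 20 + 20))
      else none) := by
  induction m with
  | zero =>
    intro z a ha hz
    rw [pyRange20_nil a (by omega)]
    rw [if_neg (by omega)]
    rfl
  | succ m ih =>
    intro z a ha hz
    rw [pyRange20_cons a (by omega), List.map_cons]
    by_cases hlt : z < a + 20
    · rw [calcLoopA, if_pos ⟨hz, hlt⟩, if_pos (by omega)]
      exact congrArg some (label_eq z a (a + 20) hz hlt (by omega) rfl)
    · rw [calcLoopA, if_neg (by omega)]
      exact ih z (a + 20) (by omega) (by omega)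

theorem scan_none (z : Int) (L : List (Int × Int)) (h : ∀ g ∈ L, ¬ z ≥ g.1) :
    calcLoopA z L = none := by
  induction L with
  | nil => rfl
  | cons g rest ih =>
    rw [calcLoopA, if_neg (fun hc => h g (by simp) hc.1)]
    exact ih fun g hg => h g (by simp [hg])

theorem loop_eq_closed (z : Int) :
    calcLoopA z ((PySem.List.pyRange 0 800 20).map (fun x => (x, x + 20))) =
      (if 0 ≤ z ∧ z < 800 then
        some (PySem.Int.toStr (PySem.Int.floordiv z 20 * 20) ++ "-" ++
              PySem.Int.toStr (PySem.Int.floordiv z 20 * 20 + 20))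
      else none) := by
  rw [PySem.Int.floordiv_eq_ediv_of_pos (by norm_num : (0:Int) < 20)]
  by_cases h0 : 0 ≤ z
  · rw [scan_lemma 40 z 0 (by norm_num) h0]
    by_cases h8 : z < 800
    · rw [if_pos h8, if_pos ⟨h0, h8⟩]
    · rw [if_neg h8, if_neg (by omega)]
  · rw [if_neg (by omega)]
    refine scan_none z _ fun g hg => ?_
    obtain ⟨x, hx, rfl⟩ := List.mem_map.mp hg
    have := (PySem.List.mem_pyRange_iff_of_pos (by norm_num : (0:Int) < 20) x).mp hx
    simp only
    omega

-- ===== VERDICT (by name: the statement is the Claim_ definition above) =====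
theorem calculate_zone_group_spec : Claim_equal_calculate_zone_group := by
  intro zone _ hpre
  unfold Spec_calculate_zone_group calculate_zone_group calculate_zone_group_alt
  by_cases hA : zone = "ALL"
  · simp [hA]
  · simp only [if_neg hA]
    cases hz : PySem.Int.ofStr? zone with
    | none => rfl
    | some z => exact loop_eq_closed z
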